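-- pv_equiv track=rewrite | github.com/TonyE20/python_data_structure | python_data_structure.py | flip_case
-- ===== SOURCE A (Python) =====
-- def flip_case(phrase, to_swap):
--     string = ""
--     for char in phrase:
--         if char == to_swap:
--             string+= char.upper()
--         elif char == to_swap.upper():
--             string+= char.lower()
--         else: string+= char
--     return string
--
--
--     """Flip [to_swap] case each time it appears in phrase.
--
--         >>> flip_case('Aaaahhh', 'a')
--         'aAAAhhh'
--
--         >>> flip_case('Aaaahhh', 'A')
--         'aAAAhhh'
--
--         >>> flip_case('Aaaahhh', 'h')
--         'AaaaHHH'
--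
--     """
-- ===== SOURCE B (Python) =====
-- def flip_case(phrase, to_swap):
--     # Staged passes instead of a per-character branch chain: only a single
--     # character can ever equal a character of phrase, so a to_swap that is not
--     # one character leaves the phrase unchanged.
--     if len(to_swap) != 1:
--         return phrase
--     u = to_swap.upper()
--     lo = u.lower()
--     return u.join(p.replace(u, lo) for p in phrase.split(to_swap))
-- ===== Notes on version B (the rewrite author's own statement) =====
-- stated objective: faster
-- what changed: A's per-character if/elif/else loop with quadratic += string building is replaced by staged whole-string passes: split the phrase on to_swap, replace the uppercase variant by its lowercase inside each piece, and rejoin the pieces with the uppercase variant (a to_swap that is not one character cannot equal any character, so the phrase is returned unchanged).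
import Mathlib
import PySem

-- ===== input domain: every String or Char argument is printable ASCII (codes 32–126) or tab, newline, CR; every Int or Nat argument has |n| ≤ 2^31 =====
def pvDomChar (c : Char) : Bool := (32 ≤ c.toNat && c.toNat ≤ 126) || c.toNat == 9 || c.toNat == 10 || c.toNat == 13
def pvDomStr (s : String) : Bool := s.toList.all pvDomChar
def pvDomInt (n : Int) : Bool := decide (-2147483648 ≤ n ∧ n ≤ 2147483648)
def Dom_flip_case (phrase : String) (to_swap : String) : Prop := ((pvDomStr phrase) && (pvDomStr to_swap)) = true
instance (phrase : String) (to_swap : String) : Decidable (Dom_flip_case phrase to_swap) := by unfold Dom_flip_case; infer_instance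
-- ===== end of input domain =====

-- B replaces A's per-character if/elif/else loop by staged whole-string passes:
-- split the phrase on to_swap, lowercase the uppercase variant inside each piece
-- with replace, and rejoin the pieces with the uppercase variant (a non-single-character
-- to_swap can never equal a character, so the phrase is returned unchanged then).

-- ===== PORT A =====
-- accumulator loop over the characters, branch chain in A's order; strings handled as char lists (PySem.Chars)
def flip_case (phrase : String) (to_swap : String) : String :=
  String.ofList (phrase.toList.foldl (fun string char =>
    if [char] = to_swap.toList then string ++ PySem.Chars.upper [char]
    else if [char] = PySem.Chars.upper to_swap.toList then string ++ PySem.Chars.lower [char]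
    else string ++ [char]) [])

-- ===== PORT B =====
-- guard, then split on to_swap / replace u by lo inside each piece / join the pieces with u
def flip_case_alt (phrase : String) (to_swap : String) : String :=
  if to_swap.toList.length ≠ 1 then phrase
  else
    let u := PySem.Chars.upper to_swap.toList
    let lo := PySem.Chars.lower u
    String.ofList (PySem.Chars.join u
      ((PySem.Chars.splitOn phrase.toList to_swap.toList).map
        (fun p => PySem.Chars.replace p u lo)))

-- ===== PRECONDITION & SPEC =====
def Spec_flip_case (phrase : String) (to_swap : String) (out : String) : Prop := out = flip_case_alt phrase to_swap
instance (phrase : String) (to_swap : String) (out : String) : Decidable (Spec_flip_case phrase to_swap out) := by unfold Spec_flip_case; infer_instance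

-- ===== CLAIM (what is proved, stated in full; the proofs are below) =====
def Claim_equal_flip_case : Prop := ∀ (phrase : String) (to_swap : String), Dom_flip_case phrase to_swap → Spec_flip_case phrase to_swap (flip_case phrase to_swap)

-- ===== LEMMAS AND PROOFS =====

def splitc (t : Char) : List Char → List (List Char)
  | [] => [[]]
  | c :: l => if c = t then [] :: splitc t l else (splitc t l).modifyHead (c :: ·)

lemma splitc_ne_nil (t : Char) (l : List Char) : splitc t l ≠ [] := by
  cases l with
  | nil => simp [splitc]
  | cons c l =>
    simp only [splitc]
    split_ifs
    · simp
    · intro h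
      have := congrArg List.length h
      simp at this
      exact splitc_ne_nil t l this

lemma splitOn_go_eq (t : Char) :
    ∀ (fuel : Nat) (l cur : List Char) (accs : List (List Char)),
      l.length ≤ fuel →
      PySem.Chars.splitOn.go [t] fuel l cur accs =
        accs.reverse ++ (splitc t l).modifyHead (cur.reverse ++ ·) := by
  intro fuel
  induction fuel with
  | zero =>
    intro l cur accs h
    have : l = [] := by cases l <;> simp_all
    subst this
    simp [PySem.Chars.splitOn.go, splitc]
  | succ f ih =>
    intro l cur accs h
    cases l with
    | nil => simp [PySem.Chars.splitOn.go, splitc]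
    | cons c rest =>
      rw [PySem.Chars.splitOn.go]
      simp only [List.length_cons] at h
      by_cases hc : t = c
      · subst hc
        simp only [List.isPrefixOf, beq_self_eq_true, List.isPrefixOf_nil_left, Bool.and_self,
          if_pos, List.length_cons, List.length_nil, Nat.zero_add, List.drop_succ_cons,
          List.drop_zero, if_true]
        rw [ih rest [] (cur.reverse :: accs) (by omega)]
        simp only [splitc, if_pos rfl, List.reverse_cons, List.append_assoc, List.reverse_nil,
          List.nil_append, List.modifyHead_cons, List.append_nil, List.singleton_append]
        rw [show (fun x : List Char => x) = id from rfl, List.modifyHead_id]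
        simp
      · have hpre : [t].isPrefixOf (c :: rest) = false := by
          simp [List.isPrefixOf]; intro h'; exact hc h'
        rw [hpre]
        simp only [Bool.false_eq_true, if_false]
        rw [ih rest (c :: cur) accs (by omega)]
        have hct : ¬ (c = t) := fun h' => hc h'.symm
        simp only [splitc, hct, if_false]
        obtain ⟨z, zs, hz⟩ : ∃ z zs, splitc t rest = z :: zs := by
          cases hzz : splitc t rest with
          | nil => exact absurd hzz (splitc_ne_nil t rest)
          | cons z zs => exact ⟨z, zs, rfl⟩
        rw [hz]
        simp [List.modifyHead]

lemma splitOn_eq_splitc (t : Char) (l : List Char) :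
    PySem.Chars.splitOn l [t] = splitc t l := by
  rw [PySem.Chars.splitOn, splitOn_go_eq t (l.length + 1) l [] [] (by omega)]
  simp
  rw [show (fun x : List Char => x) = id from rfl, List.modifyHead_id]
  simp

def repc (u : Char) (new : List Char) : List Char → List Char
  | [] => []
  | c :: l => (if c = u then new else [c]) ++ repc u new l

lemma replace_go_eq (u : Char) (new : List Char) :
    ∀ (fuel : Nat) (l acc : List Char),
      l.length ≤ fuel →
      PySem.Chars.replace.go [u] new fuel l acc = acc.reverse ++ repc u new l := by
  intro fuel
  induction fuel with
  | zero =>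
    intro l acc h
    have : l = [] := by cases l <;> simp_all
    subst this
    simp [PySem.Chars.replace.go, repc]
  | succ f ih =>
    intro l acc h
    cases l with
    | nil => simp [PySem.Chars.replace.go, repc]
    | cons c rest =>
      rw [PySem.Chars.replace.go]
      simp only [List.length_cons] at h
      by_cases hc : u = c
      · subst hc
        simp only [List.isPrefixOf, beq_self_eq_true, List.isPrefixOf_nil_left, Bool.and_self,
          if_pos, List.length_cons, List.length_nil, Nat.zero_add, List.drop_succ_cons,
          List.drop_zero]
        rw [ih rest (new.reverse ++ acc) (by omega)]
        simp [repc]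
      · have hpre : [u].isPrefixOf (c :: rest) = false := by
          simp [List.isPrefixOf]; intro h'; exact hc h'
        rw [hpre]
        simp only [Bool.false_eq_true, if_false]
        rw [ih rest (c :: acc) (by omega)]
        have hcu : ¬ (c = u) := fun h' => hc h'.symm
        simp [repc, hcu]

lemma replace_eq_repc (u : Char) (new l : List Char) :
    PySem.Chars.replace l [u] new = repc u new l := by
  rw [PySem.Chars.replace]
  simp only [List.isEmpty_cons, Bool.false_eq_true, if_false]
  exact replace_go_eq u new l.length l [] (by omega)

lemma join_head_append (sep p z : List Char) (zs : List (List Char)) :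
    PySem.Chars.join sep ((p ++ z) :: zs) = p ++ PySem.Chars.join sep (z :: zs) := by
  cases zs with
  | nil => rw [PySem.Chars.join_singleton, PySem.Chars.join_singleton]
  | cons w ws =>
    rw [PySem.Chars.join_cons_cons, PySem.Chars.join_cons_cons]
    simp [List.append_assoc]

lemma pipeline_eq (t u' : Char) (lo : List Char) (l : List Char) :
    PySem.Chars.join [u'] ((splitc t l).map (fun p => repc u' lo p)) =
      (l.map (fun c => if c = t then [u'] else if c = u' then lo else [c])).flatten := by
  induction l with
  | nil => simp [splitc, repc, PySem.Chars.join_singleton]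
  | cons c l ih =>
    by_cases hc : c = t
    · subst hc
      simp only [splitc, if_pos rfl, List.map_cons, List.map, repc]
      obtain ⟨z, zs, hz⟩ : ∃ z zs, splitc c l = z :: zs := by
        cases hzz : splitc c l with
        | nil => exact absurd hzz (splitc_ne_nil c l)
        | cons z zs => exact ⟨z, zs, rfl⟩
      rw [hz] at ih ⊢
      simp only [if_true, List.map_cons, List.flatten_cons]
      rw [PySem.Chars.join_cons_cons]
      rw [List.map_cons] at ih
      rw [ih]
      simp [repc]
    · obtain ⟨z, zs, hz⟩ : ∃ z zs, splitc t l = z :: zs := by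
        cases hzz : splitc t l with
        | nil => exact absurd hzz (splitc_ne_nil t l)
        | cons z zs => exact ⟨z, zs, rfl⟩
      simp only [splitc, hc, if_false, hz, List.modifyHead_cons, List.map_cons]
      have : repc u' lo (c :: z) = (if c = u' then lo else [c]) ++ repc u' lo z := rfl
      rw [this, join_head_append]
      rw [hz, List.map_cons] at ih
      rw [ih]
      simp [hc]

lemma hfoldL (ts : List Char) (l : List Char) (g : Char → List Char)
    (hg : ∀ c, (if [c] = ts then PySem.Chars.upper [c]
             else if [c] = PySem.Chars.upper ts then PySem.Chars.lower [c]
             else [c]) = g c) :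
    l.foldl (fun string char =>
        if [char] = ts then string ++ PySem.Chars.upper [char]
        else if [char] = PySem.Chars.upper ts then string ++ PySem.Chars.lower [char]
        else string ++ [char]) [] = (l.map g).flatten := by
  have : (fun (string : List Char) (char : Char) =>
      if [char] = ts then string ++ PySem.Chars.upper [char]
      else if [char] = PySem.Chars.upper ts then string ++ PySem.Chars.lower [char]
      else string ++ [char]) = (fun string char => string ++ g char) := by
    funext s c
    rw [← hg c]
    split_ifs <;> rfl
  rw [this, PySem.List.foldl_append_eq_flatMap]
  simp [List.flatMap_def]

-- ===== VERDICT (by name: the statement is the Claim_ definition above) =====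
theorem flip_case_spec : Claim_equal_flip_case := by
  intro phrase to_swap _
  unfold Spec_flip_case flip_case flip_case_alt
  by_cases hlen : to_swap.toList.length = 1
  · obtain ⟨t, ht⟩ : ∃ t, to_swap.toList = [t] := by
      cases hts : to_swap.toList with
      | nil => simp [hts] at hlen
      | cons a as => cases as with
        | nil => exact ⟨a, rfl⟩
        | cons b bs => simp [hts] at hlen
    rw [if_neg (by simp [hlen])]
    rw [ht, splitOn_eq_splitc]
    have hrep : (fun p => PySem.Chars.replace p (PySem.Chars.upper [t]) (PySem.Chars.lower (PySem.Chars.upper [t])))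
        = (fun p => repc (PySem.Chars.upperChar t) [PySem.Chars.lowerChar (PySem.Chars.upperChar t)] p) := by
      funext p
      simp [PySem.Chars.upper, PySem.Chars.lower]
      rw [replace_eq_repc]
    simp only [ht, hrep]
    have hu : PySem.Chars.upper [t] = [PySem.Chars.upperChar t] := by simp [PySem.Chars.upper]
    rw [hfoldL [t] phrase.toList (fun c => if c = t then [PySem.Chars.upperChar t]
          else if c = PySem.Chars.upperChar t then [PySem.Chars.lowerChar (PySem.Chars.upperChar t)] else [c])]
    · rw [hu, pipeline_eq t (PySem.Chars.upperChar t) [PySem.Chars.lowerChar (PySem.Chars.upperChar t)] phrase.toList]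
    intro c
    by_cases h1 : c = t
    · subst h1; simp [PySem.Chars.upper]
    · rw [if_neg (by simp [h1]), if_neg h1, hu]
      by_cases h2 : c = PySem.Chars.upperChar t
      · subst h2; simp [PySem.Chars.lower]
      · rw [if_neg (by simp [h2]), if_neg h2]
  · rw [if_pos (by omega)]
    rw [hfoldL to_swap.toList phrase.toList (fun c => [c])]
    · have : (phrase.toList.map (fun c => [c])).flatten = phrase.toList := by
        induction phrase.toList with
        | nil => rfl
        | cons a l ihl => simp [ihl]
      rw [this]
      exact String.ofList_toList
    · intro c
      rw [if_neg, if_neg]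
      · intro h
        have h2 := congrArg List.length h
        simp only [List.length_cons, List.length_nil, PySem.Chars.upper, List.length_map] at h2
        omega
      · intro h
        have h2 := congrArg List.length h
        simp only [List.length_cons, List.length_nil] at h2
        omega
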